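-- pv_equiv track=rewrite | github.com/raeez/chiral-bar-cobar | compute/lib/jet_window_yangian.py | w3_window_dim_exact
-- ===== SOURCE A (Python) =====
-- def w3_window_dim_exact(q: int) -> int:
--     r"""Exact dimension of K_q for W_3.
--
--     Two generators: L (wt=2, red_wt=1), W (wt=3, red_wt=2).
--     A bar word using n_L copies of L and n_W copies of W has
--     rho_red = n_L + 2 * n_W.
--
--     The number of such words (as multisets) is 1 for each valid
--     (n_L, n_W) with n_L + n_W >= 1 and n_L + 2*n_W <= q.
--
--     dim(K_q) = #{(n_L, n_W) : n_L >= 0, n_W >= 0, n_L + n_W >= 1,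
--                                n_L + 2*n_W <= q}.
--     """
--     if q <= 0:
--         return 0
--     count = 0
--     for n_W in range(q // 2 + 1):
--         # n_L ranges from 0 to q - 2*n_W, but at least 1 if n_W = 0
--         max_n_L = q - 2 * n_W
--         if n_W == 0:
--             count += max(max_n_L, 0)  # n_L = 1, ..., max_n_L
--         else:
--             count += max_n_L + 1  # n_L = 0, ..., max_n_L
--     return count
-- ===== SOURCE B (Python) =====
-- def w3_window_dim_exact(q: int) -> int:
--     # Closed form: with m = q//2, the count is q + m*(q - m).
--     if q <= 0:
--         return 0
--     m = q // 2
--     return q + m * (q - m)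
-- ===== Notes on version B (the rewrite author's own statement) =====
-- stated objective: faster
-- what changed: Replaces the O(q) loop over n_W by the closed-form arithmetic-series value q + m*(q-m) with m = q//2.
import Mathlib
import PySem

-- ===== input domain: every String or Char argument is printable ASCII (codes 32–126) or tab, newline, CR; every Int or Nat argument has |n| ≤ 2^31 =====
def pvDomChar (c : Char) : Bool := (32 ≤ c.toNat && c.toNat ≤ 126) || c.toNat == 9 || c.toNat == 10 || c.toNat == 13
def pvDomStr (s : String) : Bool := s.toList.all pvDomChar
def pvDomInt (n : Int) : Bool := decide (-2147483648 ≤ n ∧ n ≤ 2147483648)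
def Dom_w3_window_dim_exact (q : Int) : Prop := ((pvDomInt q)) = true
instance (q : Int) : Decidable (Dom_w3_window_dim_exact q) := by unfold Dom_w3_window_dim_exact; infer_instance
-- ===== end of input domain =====

-- ===== PORT A =====
-- B changes: closed-form q + m*(q-m) (m = q//2) instead of A's loop over n_W (objective: faster).
def w3_window_dim_exact (q : Int) : Int :=
  if q ≤ 0 then 0
  else
    (PySem.List.pyRange 0 (PySem.Int.floordiv q 2 + 1) 1).foldl
      (fun count n_W =>
        let max_n_L := q - 2 * n_W
        if n_W == 0 then count + max max_n_L 0
        else count + (max_n_L + 1)) 0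

-- ===== PORT B =====
def w3_window_dim_exact_alt (q : Int) : Int :=
  if q ≤ 0 then 0
  else
    let m := PySem.Int.floordiv q 2
    q + m * (q - m)

-- ===== PRECONDITION & SPEC =====
def Spec_w3_window_dim_exact (q : Int) (out : Int) : Prop := out = w3_window_dim_exact_alt q
instance (q : Int) (out : Int) : Decidable (Spec_w3_window_dim_exact q out) := by unfold Spec_w3_window_dim_exact; infer_instance

-- ===== CLAIM (what is proved, stated in full; the proofs are below) =====
def Claim_equal_w3_window_dim_exact : Prop := ∀ (q : Int), Dom_w3_window_dim_exact q → Spec_w3_window_dim_exact q (w3_window_dim_exact q)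

-- ===== LEMMAS AND PROOFS =====

-- ===== VERDICT (by name: the statement is the Claim_ definition above) =====
-- the loop of A, summed: for any n, folding over range(n+1) gives q + n*(q-n)
theorem loopA (q : Int) (hq : 1 ≤ q) : ∀ n : Nat,
    (PySem.List.pyRange 0 ((n : Int) + 1) 1).foldl
      (fun count n_W =>
        let max_n_L := q - 2 * n_W
        if n_W == 0 then count + max max_n_L 0
        else count + (max_n_L + 1)) 0 = q + n * (q - n) := by
  intro n
  induction n with
  | zero =>
      rw [show ((0 : Nat) : Int) + 1 = 0 + 1 by norm_num,
          PySem.List.pyRange_one_singleton]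
      simp
      omega
  | succ k ih =>
      have h0 : (0 : Int) ≤ (k : Int) + 1 := by positivity
      have : ((k : Int) + 1 + 1) = (((k : Int) + 1) + 1) := by ring
      rw [show ((k + 1 : Nat) : Int) + 1 = ((k : Int) + 1) + 1 by push_cast; ring,
          PySem.List.pyRange_one_succ_right h0, List.foldl_append, ih]
      have hne : (((k : Int) + 1) == 0) = false := by
        simp; omega
      simp only [List.foldl, hne]
      push_cast
      ring

theorem w3_window_dim_exact_spec : Claim_equal_w3_window_dim_exact := by
  intro q _
  unfold Spec_w3_window_dim_exact w3_window_dim_exact w3_window_dim_exact_alt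
  by_cases hq : q ≤ 0
  · simp [hq]
  · have hq1 : 1 ≤ q := by omega
    have hm0 : 0 ≤ PySem.Int.floordiv q 2 := by
      simpa [PySem.Int.floordiv] using Int.fdiv_nonneg (by omega : (0:Int) ≤ q) (by norm_num)
    have hcast : ((PySem.Int.floordiv q 2).toNat : Int) = PySem.Int.floordiv q 2 :=
      Int.toNat_of_nonneg hm0
    simp only [hq, if_false]
    rw [← hcast, loopA q hq1]
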